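-- pv_equiv track=rewrite | github.com/hyperkishore/captains-log | src/captains_log/web/routes/analytics.py | calculate_context_switches
-- ===== SOURCE A (Python) =====
-- def calculate_context_switches(events: list[dict]) -> int:
--     """Count context switches (app changes)."""
--     if len(events) < 2:
--         return 0
--
--     switches = 0
--     prev_app = events[0].get("bundle_id") or events[0].get("app_name")
--
--     for event in events[1:]:
--         app = event.get("bundle_id") or event.get("app_name")
--         if app and app != prev_app:
--             switches += 1
--             prev_app = app
--
--     return switches
-- ===== SOURCE B (Python) =====
-- def calculate_context_switches(events: list[dict]) -> int:
--     """Count context switches (app changes): filter to resolved apps, count run boundaries."""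
--     if len(events) < 2:
--         return 0
--
--     def resolve(e):
--         return e.get("bundle_id") or e.get("app_name")
--
--     seq = [resolve(events[0])] + [a for e in events[1:] if (a := resolve(e))]
--     return sum(x != y for x, y in zip(seq, seq[1:]))
-- ===== Notes on version B (the rewrite author's own statement) =====
-- stated objective: simpler
-- what changed: Replaces the stateful switches/prev_app accumulator loop with a two-phase shape: build the sequence of truthy resolved apps (keeping the first event's resolved app unconditionally) and count adjacent unequal pairs with zip.
import Mathlib
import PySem

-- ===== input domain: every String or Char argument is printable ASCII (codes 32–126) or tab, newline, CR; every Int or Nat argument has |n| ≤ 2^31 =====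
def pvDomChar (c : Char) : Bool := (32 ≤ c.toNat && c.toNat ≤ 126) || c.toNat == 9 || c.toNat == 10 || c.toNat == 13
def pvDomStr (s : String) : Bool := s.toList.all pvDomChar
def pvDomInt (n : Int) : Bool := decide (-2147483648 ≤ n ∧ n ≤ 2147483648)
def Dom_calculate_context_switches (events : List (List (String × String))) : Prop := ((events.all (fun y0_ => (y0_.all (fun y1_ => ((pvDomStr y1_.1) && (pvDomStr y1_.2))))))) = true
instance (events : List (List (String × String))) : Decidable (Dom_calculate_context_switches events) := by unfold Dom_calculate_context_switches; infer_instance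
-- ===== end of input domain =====

-- B replaces A's stateful switches/prev_app loop with a filter-then-count-adjacent-unequal-pairs decomposition (objective: simpler).


-- A-side helper: e.get("bundle_id") or e.get("app_name")  (Python 'or': None and "" are falsy)
def pvResolve (e : List (String × String)) : Option String :=
  match (PySem.Dict.mk e).get? "bundle_id" with
  | some s => if s ≠ "" then some s else (PySem.Dict.mk e).get? "app_name"
  | none => (PySem.Dict.mk e).get? "app_name"

-- A-side truthiness test for 'if app and …'
def pvTruthy (o : Option String) : Bool :=
  match o with
  | some s => s ≠ ""
  | none => false

-- ===== PORT A =====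
def calculate_context_switches (events : List (List (String × String))) : Int :=
  match events with
  | [] => 0
  | [_] => 0
  | e0 :: rest =>
    (rest.foldl
      (fun (st : Int × Option String) e =>
        let app := pvResolve e
        if pvTruthy app ∧ app ≠ st.2 then (st.1 + 1, app) else st)
      (0, pvResolve e0)).1

-- ===== PORT B =====
-- B-side helper: resolve(e) = e.get("bundle_id") or e.get("app_name")
def pvResolveB (e : List (String × String)) : Option String :=
  match (PySem.Dict.mk e).get? "bundle_id" with
  | some s => if s ≠ "" then some s else (PySem.Dict.mk e).get? "app_name"
  | none => (PySem.Dict.mk e).get? "app_name"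

-- B-side truthiness filter (walrus 'if (a := resolve(e))')
def pvTruthyB (o : Option String) : Bool :=
  match o with
  | some s => s ≠ ""
  | none => false

def calculate_context_switches_alt (events : List (List (String × String))) : Int :=
  if events.length < 2 then 0
  else
    let seq := pvResolveB (events.headD []) :: ((events.drop 1).map pvResolveB).filter pvTruthyB
    ((seq.zip seq.tail).map (fun p => if p.1 ≠ p.2 then (1 : Int) else 0)).sum

-- ===== PRECONDITION & SPEC =====
def Spec_calculate_context_switches (events : List (List (String × String))) (out : Int) : Prop := out = calculate_context_switches_alt events
instance (events : List (List (String × String))) (out : Int) : Decidable (Spec_calculate_context_switches events out) := by unfold Spec_calculate_context_switches; infer_instance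

-- ===== CLAIM (what is proved, stated in full; the proofs are below) =====
def Claim_equal_calculate_context_switches : Prop := ∀ (events : List (List (String × String))), Dom_calculate_context_switches events → Spec_calculate_context_switches events (calculate_context_switches events)

-- ===== LEMMAS AND PROOFS =====

theorem pvResolveB_eq : pvResolveB = pvResolve := rfl

theorem pvTruthyB_eq : pvTruthyB = pvTruthy := rfl

-- number of adjacent changes in p :: L, counting a pair (p, a) with p ≠ a as 1
def pvPairCnt (p : Option String) (L : List (Option String)) : Int :=
  match L with
  | [] => 0
  | a :: L' => (if p ≠ a then 1 else 0) + pvPairCnt a L'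

theorem pvLoopA_eq (rest : List (List (String × String))) :
    ∀ (s : Int) (prev : Option String),
      (rest.foldl
        (fun (st : Int × Option String) e =>
          let app := pvResolve e
          if pvTruthy app ∧ app ≠ st.2 then (st.1 + 1, app) else st)
        (s, prev)).1
      = s + pvPairCnt prev ((rest.map pvResolve).filter pvTruthy) := by
  induction rest with
  | nil => intro s prev; simp [pvPairCnt]
  | cons e rest ih =>
    intro s prev
    simp only [List.foldl_cons, List.map_cons, List.filter_cons]
    by_cases ht : pvTruthy (pvResolve e)
    · by_cases hne : pvResolve e ≠ prev
      · simp [ht, hne, ih, pvPairCnt, ne_comm.mp hne]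
        ring
      · push Not at hne
        subst hne
        simp [ht, ih, pvPairCnt]
    · simp [ht, ih]

theorem pvZipSum_eq (L : List (Option String)) :
    ∀ (p : Option String),
      (((p :: L).zip L).map (fun q => if q.1 ≠ q.2 then (1 : Int) else 0)).sum
      = pvPairCnt p L := by
  induction L with
  | nil => intro p; simp [pvPairCnt]
  | cons a L' ih =>
    intro p
    simp only [List.zip_cons_cons, List.map_cons, List.sum_cons, pvPairCnt]
    rw [ih a]

-- ===== VERDICT (by name: the statement is the Claim_ definition above) =====
theorem calculate_context_switches_spec : Claim_equal_calculate_context_switches := by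
  intro events _
  unfold Spec_calculate_context_switches calculate_context_switches calculate_context_switches_alt
  match events with
  | [] => rfl
  | [_] => rfl
  | e0 :: e1 :: rest =>
    rw [if_neg (by simp)]
    simp only [pvResolveB_eq, pvTruthyB_eq, List.headD_cons, List.drop_one, List.tail_cons]
    rw [pvLoopA_eq]
    rw [pvZipSum_eq]
    ring
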